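-- pv_equiv track=rewrite | github.com/MrBrantCode/unitest_baseline | mut_generate/mist_train_cf/cf_73967/solution.py | extract_advanced_data
-- ===== SOURCE A (Python) =====
-- def extract_advanced_data(input_string):
--     if ',' in input_string:
--         split_sequence = input_string.split(',')
--         return {word: split_sequence.count(word) for word in set(split_sequence)}
--     elif ':' in input_string:
--         split_sequence = input_string.split(':')
--         return {word: split_sequence.count(word) for word in set(split_sequence)}
--     else:
--         odd_indexed_chars = [char for char in input_string if (ord(char.lower()) - ord('a')) % 2 == 1]
--         return {char: input_string.count(char) for char in set(odd_indexed_chars)}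
-- ===== SOURCE B (Python) =====
-- def extract_advanced_data(input_string):
--     if ',' in input_string:
--         sequence = input_string.split(',')
--     elif ':' in input_string:
--         sequence = input_string.split(':')
--     else:
--         sequence = [char for char in input_string
--                     if (ord(char.lower()) - ord('a')) % 2 == 1]
--     counts = {}
--     for item in sequence:
--         counts[item] = counts.get(item, 0) + 1
--     return counts
-- ===== Notes on version B (the rewrite author's own statement) =====
-- stated objective: idiomatic
-- what changed: Replaces the per-distinct-element .count rescans (a dict comprehension over set(seq)) by a single counting pass that accumulates counts in one dict, removing the inner scan; same values because a dict is order-insensitive.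
import Mathlib
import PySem

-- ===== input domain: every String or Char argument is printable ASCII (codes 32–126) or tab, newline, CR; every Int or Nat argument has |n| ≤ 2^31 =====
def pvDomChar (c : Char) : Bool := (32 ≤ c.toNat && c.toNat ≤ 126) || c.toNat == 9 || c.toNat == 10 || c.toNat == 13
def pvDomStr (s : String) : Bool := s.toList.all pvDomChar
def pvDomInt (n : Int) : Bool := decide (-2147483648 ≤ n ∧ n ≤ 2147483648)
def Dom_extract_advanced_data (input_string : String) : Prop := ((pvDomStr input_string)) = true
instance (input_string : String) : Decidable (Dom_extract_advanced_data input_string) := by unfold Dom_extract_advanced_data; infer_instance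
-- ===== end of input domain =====

-- B replaces A's per-distinct-element `.count` rescans by a single counting pass over the
-- sequence with one dict (objective: idiomatic; the inner scan disappears).

-- shared helper: the comprehension filter `(ord(char.lower()) - ord('a')) % 2 == 1`
-- (identical text in both Pythons)
def pvOddChar (c : Char) : Bool :=
  PySem.Int.mod (((PySem.Chars.lowerChar c).toNat : Int) - 97) 2 == 1

-- ===== PORT A =====
-- `s.split(sep)` for the nonempty literal separators is Chars.splitOn (exact for sep ≠ "")
def extract_advanced_data (input_string : String) : List (String × Int) :=
  if PySem.Str.isIn "," input_string then
    let split_sequence := (PySem.Chars.splitOn input_string.toList [',']).map String.ofList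
    (PySem.Set.ofList split_sequence).map (fun word => (word, (split_sequence.count word : Int)))
  else if PySem.Str.isIn ":" input_string then
    let split_sequence := (PySem.Chars.splitOn input_string.toList [':']).map String.ofList
    (PySem.Set.ofList split_sequence).map (fun word => (word, (split_sequence.count word : Int)))
  else
    let odd_indexed_chars := input_string.toList.filter pvOddChar
    (PySem.Set.ofList odd_indexed_chars).map
      (fun c => (String.ofList [c], (PySem.Str.count input_string (String.ofList [c]) : Int)))

-- ===== PORT B =====
def extract_advanced_data_alt (input_string : String) : List (String × Int) :=
  let sequence :=
    if PySem.Str.isIn "," input_string then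
      (PySem.Chars.splitOn input_string.toList [',']).map String.ofList
    else if PySem.Str.isIn ":" input_string then
      (PySem.Chars.splitOn input_string.toList [':']).map String.ofList
    else
      (input_string.toList.filter pvOddChar).map (fun c => String.ofList [c])
  (sequence.foldl (fun counts item => counts.insert item (counts.getD item 0 + 1))
    PySem.Dict.empty).items

-- ===== PRECONDITION & SPEC =====
def Spec_extract_advanced_data (input_string : String) (out : List (String × Int)) : Prop := out = extract_advanced_data_alt input_string
instance (input_string : String) (out : List (String × Int)) : Decidable (Spec_extract_advanced_data input_string out) := by unfold Spec_extract_advanced_data; infer_instance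

-- ===== CLAIM (what is proved, stated in full; the proofs are below) =====
def Claim_equal_extract_advanced_data : Prop := ∀ (input_string : String), Dom_extract_advanced_data input_string → Spec_extract_advanced_data input_string (extract_advanced_data input_string)

-- ===== LEMMAS AND PROOFS =====

-- B's counting loop over any sequence yields exactly A's {word: seq.count(word) for word in set(seq)}
theorem counter_items_eq (xs : List String) :
    (xs.foldl (fun d x => d.insert x (d.getD x 0 + 1)) PySem.Dict.empty).items
      = (PySem.Set.ofList xs).map (fun w => (w, (xs.count w : Int))) := by
  rw [PySem.Dict.foldl_insert_getD_add_one_eq_counter, PySem.Dict.items_counter]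

theorem set_add_map {α β : Type} [DecidableEq α] [DecidableEq β] (f : α → β)
    (hf : Function.Injective f) (s : PySem.Set α) (x : α) :
    PySem.Set.add (s.map f) (f x) = (PySem.Set.add s x).map f := by
  by_cases hx : x ∈ s
  · simp only [PySem.Set.add]
    have : f x ∈ s.map f := List.mem_map.mpr ⟨x, hx, rfl⟩
    simp [hx, this]
  · have : f x ∉ s.map f := by
      simp only [List.mem_map, not_exists]
      rintro a ⟨ha, hfa⟩
      exact hx (hf hfa ▸ ha)
    simp [PySem.Set.add, hx, this]

theorem set_ofList_map {α β : Type} [DecidableEq α] [DecidableEq β] (f : α → β)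
    (hf : Function.Injective f) (xs : List α) :
    PySem.Set.ofList (xs.map f) = (PySem.Set.ofList xs).map f := by
  suffices h : ∀ (s : PySem.Set α),
      List.foldl PySem.Set.add (s.map f) (xs.map f) = (List.foldl PySem.Set.add s xs).map f by
    simpa [PySem.Set.ofList, PySem.Set.empty] using h []
  induction xs with
  | nil => intro s; simp
  | cons y ys ih => intro s; simpa [set_add_map f hf] using ih (PySem.Set.add s y)

-- counting a single character as a substring is counting it as a list element
theorem count_go_singleton (c : Char) (l : List Char) (fuel acc : ℕ) (h : l.length ≤ fuel) :
    PySem.Chars.count.go [c] fuel l acc = acc + l.count c := by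
  induction l generalizing fuel acc with
  | nil => cases fuel <;> simp [PySem.Chars.count.go]
  | cons x t ih =>
    cases fuel with
    | zero => simp at h
    | succ fuel =>
      have ht : t.length ≤ fuel := by simpa using h
      by_cases hx : c = x
      · subst hx
        simp [PySem.Chars.count.go, List.isPrefixOf, ih _ _ ht]
        omega
      · have hpre : ([c].isPrefixOf (x :: t)) = false := by
          simp [List.isPrefixOf]
          exact hx
        simp [PySem.Chars.count.go, hpre, ih _ _ ht, Ne.symm hx]

theorem count_singleton (s : List Char) (c : Char) :
    PySem.Chars.count s [c] = s.count c := by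
  simpa [PySem.Chars.count] using count_go_singleton c s s.length 0 le_rfl

-- ===== VERDICT (by name: the statement is the Claim_ definition above) =====
theorem extract_advanced_data_spec : Claim_equal_extract_advanced_data := by
  intro s _
  show extract_advanced_data s = extract_advanced_data_alt s
  unfold extract_advanced_data extract_advanced_data_alt
  by_cases h1 : PySem.Str.isIn "," s
  · simp only [h1, if_pos, counter_items_eq]
  · by_cases h2 : PySem.Str.isIn ":" s
    · simp only [h1, h2, if_pos, if_neg, Bool.false_eq_true, not_false_eq_true, counter_items_eq]
    · simp only [h1, h2, Bool.false_eq_true, if_neg, not_false_eq_true, counter_items_eq]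
      have hinj : Function.Injective (fun c => String.ofList [c]) := by
        intro a b hab
        simpa [String.toList_ofList] using congrArg String.toList hab
      rw [set_ofList_map _ hinj, List.map_map]
      apply List.map_congr_left
      intro c hc
      have hc' : c ∈ s.toList.filter pvOddChar := by
        rwa [PySem.Set.mem_ofList] at hc
      have hpred : pvOddChar c = true := (List.mem_filter.mp hc').2
      simp only [Function.comp]
      congr 1
      have h1 : PySem.Str.count s (String.ofList [c]) = s.toList.count c := by
        rw [PySem.Str.count_eq, String.toList_ofList, count_singleton]
      have h2 : ((s.toList.filter pvOddChar).map (fun c => String.ofList [c])).count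
          (String.ofList [c]) = s.toList.count c := by
        rw [List.count_map_of_injective _ _ hinj]
        rw [List.count_filter]
        simp [hpred]
      rw [h1, h2]
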